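-- pv_equiv track=rewrite | github.com/kcyu2014/nas-landmarkreg | nasws/cnn/policy/nao_policy/utils_for_nasbench.py | parse_seq_to_arch
-- ===== SOURCE A (Python) =====
-- import copy
--
-- NASBENCH101_ArchLength2Node = {
--         1:  2,
--         4:  3,
--         8:  4,
--         13: 5,
--         19: 6,
--         26: 7
--             }
--
-- def compute_op_ids(num_nodes):
--     op_ids = []
--     offset = 0
--     for i in range(1, num_nodes- 1):
--         offset += (i + 1)
--         op_ids.append(offset-1)
--     return op_ids
--
-- def define_num_nodes_from_arch(arch):
--     return NASBENCH101_ArchLength2Node[len(arch)]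
--
-- def parse_seq_to_arch(seq, branch_length=None, B=None):
--     """ same as arch2seq, note that B is """
--     B = B + 2 or define_num_nodes_from_arch(seq)
--     arch = copy.deepcopy(seq)
--     oids = compute_op_ids(B)
--     for i in range(len(arch)):
--         if i in oids:
--             arch[i] -= 3
--         else:
--             arch[i] -= 1
--     return arch
-- ===== SOURCE B (Python) =====
-- NASBENCH101_ArchLength2Node = {
--         1:  2,
--         4:  3,
--         8:  4,
--         13: 5,
--         19: 6,
--         26: 7
--             }
--
-- def define_num_nodes_from_arch(arch):
--     return NASBENCH101_ArchLength2Node[len(arch)]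
--
-- def parse_seq_to_arch(seq, branch_length=None, B=None):
--     """Single streaming pass: no op-id list is ever built.  The op positions
--     form the arithmetic-progression-of-gaps sequence 1, 4, 8, 13, ... so we
--     keep a countdown to the next op position and the current gap as state."""
--     B = B + 2 or define_num_nodes_from_arch(seq)
--     out = []
--     until, gap, remaining = 1, 3, B - 2
--     for x in seq:
--         if remaining > 0 and until == 0:
--             out.append(x - 3)
--             until = gap - 1
--             gap += 1
--             remaining -= 1
--         else:
--             out.append(x - 1)
--             until -= 1
--     return out
-- ===== Notes on version B (the rewrite author's own statement) =====
-- stated objective: alternative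
-- what changed: A precomputes the op-id list and for every index scans it with 'i in oids'; B never builds that list at all: one streaming pass over seq keeps only a countdown to the next op position and the current gap (the op positions 1,4,8,13,... form an arithmetic progression of gaps), subtracting 3 when the countdown hits zero and 1 otherwise.
import Mathlib
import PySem

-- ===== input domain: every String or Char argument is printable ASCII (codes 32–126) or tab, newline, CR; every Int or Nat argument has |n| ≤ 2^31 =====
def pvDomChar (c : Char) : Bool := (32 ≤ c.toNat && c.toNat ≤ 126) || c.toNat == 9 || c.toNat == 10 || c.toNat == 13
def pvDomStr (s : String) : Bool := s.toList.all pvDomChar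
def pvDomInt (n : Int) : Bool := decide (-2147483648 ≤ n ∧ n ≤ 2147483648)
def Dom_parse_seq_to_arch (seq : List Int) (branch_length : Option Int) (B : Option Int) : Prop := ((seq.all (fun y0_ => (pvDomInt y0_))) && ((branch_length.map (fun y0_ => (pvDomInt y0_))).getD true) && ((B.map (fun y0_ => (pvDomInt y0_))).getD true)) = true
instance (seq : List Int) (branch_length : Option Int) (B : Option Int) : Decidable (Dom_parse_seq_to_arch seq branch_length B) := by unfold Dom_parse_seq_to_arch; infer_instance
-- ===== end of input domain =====

-- B replaces A's op-id list + per-index membership scan by one streaming pass that keeps only a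
-- countdown to the next op position and the current gap (objective: alternative algorithm, no op-id list).

-- ===== PORT A =====
-- NASBENCH101_ArchLength2Node (module constant, a dict keyed by arch length)
def pvNB101 : PySem.Dict Int Int := PySem.Dict.ofList [(1, 2), (4, 3), (8, 4), (13, 5), (19, 6), (26, 7)]

-- op_ids.append(x) inside the loop is ported as cons + final reverse (the O(m) faithful port of append)
def compute_op_ids (num_nodes : Int) : List Int :=
  (((PySem.List.pyRange 1 (num_nodes - 1) 1).foldl
    (fun (st : List Int × Int) i => (((st.2 + (i + 1)) - 1) :: st.1, st.2 + (i + 1)))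
    ([], 0)).1).reverse

-- dict lookup; KeyError (= none) is excluded by Pre_, so the default 0 is never the value used
def define_num_nodes_from_arch (arch : List Int) : Int :=
  (PySem.Dict.get? pvNB101 ((arch.length : Int))).getD 0

def parse_seq_to_arch (seq : List Int) (branch_length : Option Int) (B : Option Int) : List Int :=
  -- B = None raises TypeError on 'B + 2'; excluded by Pre_, so the default 0 is never the value used
  let b0 : Int := B.getD 0 + 2
  let b : Int := if b0 ≠ 0 then b0 else define_num_nodes_from_arch seq
  let oids := compute_op_ids b
  (List.range seq.length).foldl
    (fun arch (i : Nat) =>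
      if ((i : Int)) ∈ oids then arch.set i (arch.getD i 0 - 3)
      else arch.set i (arch.getD i 0 - 1)) seq

-- ===== PORT B =====
-- the loop body of Source B's single pass: state (out accumulator, until, gap, remaining)
def pvStep (st : List Int × Int × Int × Int) (x : Int) : List Int × Int × Int × Int :=
  match st with
  | (out, u, g, r) =>
    if 0 < r ∧ u = 0 then (((x - 3) :: out), g - 1, g + 1, r - 1)
    else (((x - 1) :: out), u - 1, g, r)

def parse_seq_to_arch_alt (seq : List Int) (branch_length : Option Int) (B : Option Int) : List Int :=
  let b0 : Int := B.getD 0 + 2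
  let b : Int := if b0 ≠ 0 then b0 else define_num_nodes_from_arch seq
  -- out.append(x) ported as cons; the final reverse restores order
  ((seq.foldl pvStep ([], 1, 3, b - 2)).1).reverse

-- ===== PRECONDITION & SPEC =====
-- Pre_ excludes exactly the inputs where A raises: B = None (TypeError on 'B + 2') and
-- B = -2 with a list length outside the NASBENCH101 table (KeyError).
def Pre_parse_seq_to_arch (seq : List Int) (branch_length : Option Int) (B : Option Int) : Prop :=
  B.isSome = true ∧ (B = some (-2) →
    seq.length = 1 ∨ seq.length = 4 ∨ seq.length = 8 ∨ seq.length = 13 ∨ seq.length = 19 ∨ seq.length = 26)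
instance (seq : List Int) (branch_length : Option Int) (B : Option Int) : Decidable (Pre_parse_seq_to_arch seq branch_length B) := by unfold Pre_parse_seq_to_arch; infer_instance

def pvWitness_parse_seq_to_arch : List Int × Option Int × Option Int := ([5, 3, 4, 2, 6, 1, 2, 3], none, some 2)

def Spec_parse_seq_to_arch (seq : List Int) (branch_length : Option Int) (B : Option Int) (out : List Int) : Prop := out = parse_seq_to_arch_alt seq branch_length B
instance (seq : List Int) (branch_length : Option Int) (B : Option Int) (out : List Int) : Decidable (Spec_parse_seq_to_arch seq branch_length B out) := by unfold Spec_parse_seq_to_arch; infer_instance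

-- ===== CLAIM (what is proved, stated in full; the proofs are below) =====
def Claim_equal_parse_seq_to_arch : Prop := ∀ (seq : List Int) (branch_length : Option Int) (B : Option Int), Dom_parse_seq_to_arch seq branch_length B → Pre_parse_seq_to_arch seq branch_length B → Spec_parse_seq_to_arch seq branch_length B (parse_seq_to_arch seq branch_length B)

-- ===== LEMMAS AND PROOFS =====

-- the op positions as an arithmetic-progression-of-gaps stream (proof-only device)
def prog (u g : Int) : Nat → List Int
  | 0 => []
  | n + 1 => u :: prog (u + g) (g + 1) n

theorem mem_prog_shift (n : Nat) : ∀ (u g j : Int), ((j + 1) ∈ prog u g n) ↔ (j ∈ prog (u - 1) g n) := by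
  induction n with
  | zero => intro u g j; simp [prog]
  | succ m ih =>
    intro u g j
    simp only [prog, List.mem_cons]
    constructor
    · rintro (h | h)
      · left; omega
      · right; have := (ih (u + g) (g + 1) j).mp h
        have heq : u + g - 1 = u - 1 + g := by ring
        rwa [heq] at this
    · rintro (h | h)
      · left; omega
      · right
        have heq : u - 1 + g = u + g - 1 := by ring
        rw [heq] at h
        exact (ih (u + g) (g + 1) j).mpr h

theorem prog_ge (n : Nat) : ∀ (u g : Int), 0 ≤ g → ∀ x ∈ prog u g n, u ≤ x := by
  induction n with
  | zero => intro u g _ x hx; simp [prog] at hx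
  | succ m ih =>
    intro u g hg x hx
    rcases List.mem_cons.mp hx with h | h
    · omega
    · have := ih (u + g) (g + 1) (by omega) x h
      omega

-- A's compute_op_ids builds exactly the prog stream
theorem fold_prog (n : Nat) : ∀ (j off : Int) (acc : List Int),
    (((PySem.List.pyRange j (j + n) 1).foldl
      (fun (st : List Int × Int) i => (((st.2 + (i + 1)) - 1) :: st.1, st.2 + (i + 1)))
      (acc, off)).1).reverse = acc.reverse ++ prog (off + j) (j + 2) n := by
  induction n with
  | zero =>
    intro j off acc
    rw [PySem.List.pyRange_one_eq_nil (by omega)]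
    simp [prog]
  | succ m ih =>
    intro j off acc
    rw [PySem.List.pyRange_one_cons (by omega)]
    simp only [List.foldl_cons]
    have hc : (((m + 1 : Nat)) : Int) = (m : Int) + 1 := by omega
    rw [hc]
    have harg : j + ((m : Int) + 1) = (j + 1) + (m : Nat) := by omega
    rw [harg]
    rw [ih (j + 1) (off + (j + 1)) ((off + (j + 1) - 1) :: acc)]
    simp only [List.reverse_cons, List.append_assoc]
    congr 1
    have h1 : off + (j + 1) + (j + 1) = off + j + (j + 2) := by ring
    have h2 : off + (j + 1) - 1 = off + j := by ring
    simp [prog, h1, h2, show j + 1 + 2 = j + 2 + 1 from by ring]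

theorem compute_op_ids_eq_prog (b : Int) : compute_op_ids b = prog 1 3 (b - 2).toNat := by
  unfold compute_op_ids
  by_cases hb : 2 ≤ b
  · have h : b - 1 = 1 + ((b - 2).toNat : Int) := by omega
    rw [h, fold_prog (b - 2).toNat 1 0 []]
    norm_num
  · have h0 : (b - 2).toNat = 0 := by omega
    rw [PySem.List.pyRange_one_eq_nil (by omega), h0]
    simp [prog]

-- A's loop over range(len(arch)) is pointwise: subtract 3 at op positions, 1 elsewhere
theorem A_loop_eq (oids : List Int) (l : List Int) :
    (List.range l.length).foldl
      (fun arch (i : Nat) =>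
        if ((i : Int)) ∈ oids then arch.set i (arch.getD i 0 - 3)
        else arch.set i (arch.getD i 0 - 1)) l
    = l.mapIdx (fun i x => if ((i : Int)) ∈ oids then x - 3 else x - 1) := by
  have key : ∀ n, n ≤ l.length →
      (List.range n).foldl
        (fun arch (i : Nat) =>
          if ((i : Int)) ∈ oids then arch.set i (arch.getD i 0 - 3)
          else arch.set i (arch.getD i 0 - 1)) l
      = l.mapIdx (fun i x => if i < n then (if ((i : Int)) ∈ oids then x - 3 else x - 1) else x) := by
    intro n hn
    induction n with
    | zero =>
      simp only [List.range_zero, List.foldl_nil]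
      exact (List.ext_getElem (by simp) (fun i h1 h2 => by simp [List.getElem_mapIdx])).symm
    | succ m ih =>
      have hm : m ≤ l.length := by omega
      rw [List.range_succ, List.foldl_append, ih hm]
      have hml : m < l.length := by omega
      have hgetD : (l.mapIdx (fun i x => if i < m then (if ((i : Int)) ∈ oids then x - 3 else x - 1) else x)).getD m 0 = l[m] := by
        rw [List.getD_eq_getElem _ _ (by simp; omega)]
        simp [List.getElem_mapIdx]
      apply List.ext_getElem (by by_cases h : ((m : Int)) ∈ oids <;> simp [h])
      intro i h1 h2
      by_cases h : ((m : Int)) ∈ oids <;>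
        simp only [List.foldl_cons, List.foldl_nil, h, if_pos, ite_false] <;>
        simp only [hgetD] <;>
        simp only [List.getElem_set, List.getElem_mapIdx] <;>
        rcases Nat.lt_trichotomy i m with hc | hc | hc
      · simp [hc, Nat.ne_of_gt hc]; omega
      · subst hc; simp [h]
      · have : ¬ i < m := by omega
        simp [this, Nat.ne_of_lt hc]; omega
      · simp [hc, Nat.ne_of_gt hc]; omega
      · subst hc; simp [h]
      · have : ¬ i < m := by omega
        simp [this, Nat.ne_of_lt hc]; omega
  have := key l.length (le_refl _)
  rw [this]
  apply List.ext_getElem (by simp)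
  intro i h1 h2
  simp only [List.getElem_mapIdx]
  have : i < l.length := by simpa using h1
  simp [this]

-- B's streaming pass is pointwise the same: at positions of prog subtract 3, elsewhere 1
theorem B_loop_eq (l : List Int) : ∀ (u g r : Int) (acc : List Int), 1 ≤ g → (0 ≤ u ∨ r ≤ 0) →
    ((l.foldl pvStep (acc, u, g, r)).1).reverse
    = acc.reverse ++ l.mapIdx (fun j x => if ((j : Int)) ∈ prog u g r.toNat then x - 3 else x - 1) := by
  induction l with
  | nil => intro u g r acc _ _; simp
  | cons x xs ih =>
    intro u g r acc hg hinv
    simp only [List.foldl_cons, pvStep]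
    by_cases hf : 0 < r ∧ u = 0
    · rw [if_pos hf]
      obtain ⟨hr, hu⟩ := hf
      have hrt : r.toNat = (r - 1).toNat + 1 := by omega
      rw [ih (g - 1) (g + 1) (r - 1) (((x - 3) :: acc)) (by omega) (by omega)]
      simp only [List.reverse_cons, List.append_assoc, List.mapIdx_cons]
      congr 1
      have hhead : ((0 : Nat) : Int) ∈ prog u g r.toNat := by
        rw [hrt, hu]; simp [prog]
      simp only [hhead, if_pos, List.singleton_append]
      congr 1
      congr 1
      funext j x
      refine ite_congr (propext ?_) (fun _ => rfl) (fun _ => rfl)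
      rw [hrt, hu]
      simp only [prog, List.mem_cons]
      have hs := mem_prog_shift (r - 1).toNat (0 + g) (g + 1) ((j : Nat) : Int)
      have he : (0 : Int) + g - 1 = g - 1 := by ring
      rw [he] at hs
      push_cast
      constructor
      · intro h; right; exact hs.mpr h
      · rintro (h | h)
        · omega
        · exact hs.mp h
    · rw [if_neg hf]
      rw [ih (u - 1) g r (((x - 1) :: acc)) hg (by omega)]
      simp only [List.reverse_cons, List.append_assoc, List.mapIdx_cons]
      congr 1
      have hhead : ¬ (((0 : Nat)) : Int) ∈ prog u g r.toNat := by
        intro hmem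
        by_cases hr : 0 < r
        · have hu : u ≠ 0 := fun h => hf ⟨hr, h⟩
          have hu0 : 0 ≤ u := by rcases hinv with h | h; exact h; omega
          have := prog_ge r.toNat u g (by omega) _ hmem
          omega
        · have : r.toNat = 0 := by omega
          rw [this] at hmem; simp [prog] at hmem
      simp only [hhead, ite_false, List.singleton_append]
      congr 1
      congr 1
      funext j x
      refine ite_congr (propext ?_) (fun _ => rfl) (fun _ => rfl)
      have := mem_prog_shift r.toNat u g ((j : Nat) : Int)
      push_cast
      exact this.symm

-- ===== VERDICT (by name: the statement is the Claim_ definition above) =====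
theorem parse_seq_to_arch_spec : Claim_equal_parse_seq_to_arch := by
  intro seq branch_length B _ _
  unfold Spec_parse_seq_to_arch parse_seq_to_arch parse_seq_to_arch_alt
  set b0 : Int := B.getD 0 + 2 with hb0
  set b : Int := if b0 ≠ 0 then b0 else define_num_nodes_from_arch seq
  rw [A_loop_eq (compute_op_ids b) seq,
    B_loop_eq seq 1 3 (b - 2) [] (by omega) (by omega)]
  rw [compute_op_ids_eq_prog]
  simp
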